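-- pv_equiv track=rewrite | github.com/idiomaticrefactoring/IdiomatizationLLM | code/ours/loop_else/for_else_util.py | parse_abstract_for_code
-- ===== SOURCE A (Python) =====
-- def parse_abstract_for_code(content):
--     content_list = content.split("New Python code:")
--     if len(content_list) == 1:
--         content_list = content.split("New Python Code:")
--
--     symbols_list = content_list[0].strip().split("\n")
--     symbols_map = dict()
--     pre_value_list = []
--     key = ""
--     for i in symbols_list:
--         if i.startswith("symbol"):
--             continue
--         if i.startswith("var"):
--             if pre_value_list:
--                 symbols_map[key] = "\n".join(pre_value_list)
--             pre_value_list = []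
--             key = i.split(":")[0]
--             pre_value_list.append(":".join(i.split(":")[1:]))
--             symbols_map[key] = pre_value_list
--         else:
--             pre_value_list.append(i)
--     if key:
--         symbols_map[key] = "\n".join(pre_value_list)
--
--     content = content_list[-1]
--     return content.strip(), symbols_map
-- ===== SOURCE B (Python) =====
-- def parse_abstract_for_code(content):
--     parts = content.split("New Python code:")
--     if len(parts) == 1:
--         parts = content.split("New Python Code:")
--     lines = [l for l in parts[0].strip().split("\n") if not l.startswith("symbol")]
--     blocks = []
--     for line in lines:
--         if line.startswith("var"):
--             pieces = line.split(":")
--             blocks.append((pieces[0], [":".join(pieces[1:])]))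
--         elif blocks:
--             blocks[-1][1].append(line)
--     symbols_map = {}
--     for key, chunk in blocks:
--         symbols_map[key] = "\n".join(chunk)
--     return parts[-1].strip(), symbols_map
-- ===== Notes on version B (the rewrite author's own statement) =====
-- stated objective: simpler
-- what changed: Replaces A's single stateful loop (dict + pending-lines buffer + current key, with a provisional list value stored in the dict and overwritten later) by staged passes: filter out 'symbol' lines, group the rest into blocks each starting at a 'var' line, then build the map from the blocks.
-- intended difference: On inputs whose symbols section has non-'symbol' lines before the first 'var' line (and at least one 'var' line), A stores those stray leading lines in the map under the leftover empty-string key '' (initial loop state), while B simply drops them; dropping junk before the first declared symbol is the intended behaviour, an empty key is not a symbol. — e.g. on parse_abstract_for_code("junk\nvar x:1"): A returns ("junk\nvar x:1", [("", "junk"), ("var x", "1")]), B returns ("junk\nvar x:1", [("var x", "1")])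
import Mathlib
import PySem

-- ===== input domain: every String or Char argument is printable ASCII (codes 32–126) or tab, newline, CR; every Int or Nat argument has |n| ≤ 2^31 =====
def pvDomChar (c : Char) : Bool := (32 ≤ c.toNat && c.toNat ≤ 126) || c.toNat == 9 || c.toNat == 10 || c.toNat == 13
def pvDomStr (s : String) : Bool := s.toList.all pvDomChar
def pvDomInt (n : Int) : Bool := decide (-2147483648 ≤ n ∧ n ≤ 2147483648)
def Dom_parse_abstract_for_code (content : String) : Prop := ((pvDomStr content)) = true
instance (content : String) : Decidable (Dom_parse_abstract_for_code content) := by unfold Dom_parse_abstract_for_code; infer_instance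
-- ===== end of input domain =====

-- B replaces A's single stateful loop by staged passes (filter 'symbol' lines, group into 'var'-blocks,
-- build the map from the blocks); outside D_ (stray lines before the first 'var' line, which A files
-- under the leftover empty-string key and B drops) the two agree.

-- ===== PORT A =====
-- loop body of A's for-loop; state = (symbols_map, pre_value_list, key), all strings as List Char.
-- Where Python stores the aliased pre_value_list object into the dict, that entry is always overwritten
-- with its "\n"-join before any read and Dict.insert overwrites in place, so inserting the current join
-- is exact; everything else is step-for-step.
def pvAStep (st : PySem.Dict (List Char) (List Char) × List (List Char) × List Char)
    (i : List Char) : PySem.Dict (List Char) (List Char) × List (List Char) × List Char :=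
  if PySem.Chars.startswith i "symbol".toList then st
  else if PySem.Chars.startswith i "var".toList then
    let m := if st.2.1 ≠ [] then st.1.insert st.2.2 (PySem.Chars.join ['\n'] st.2.1) else st.1
    let key := (PySem.Chars.splitOn i [':']).headD []
    let pre := [PySem.Chars.join [':'] (PySem.Chars.splitOn i [':']).tail]
    (m.insert key (PySem.Chars.join ['\n'] pre), pre, key)
  else (st.1, st.2.1 ++ [i], st.2.2)

def parse_abstract_for_code (content : String) : String × (List (String × String)) :=
  let cl0 := PySem.Chars.splitOn content.toList "New Python code:".toList
  let content_list := if cl0.length == 1 then PySem.Chars.splitOn content.toList "New Python Code:".toList else cl0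
  let symbols_list := PySem.Chars.splitOn (PySem.Chars.strip (content_list.headD [])) ['\n']
  let st := symbols_list.foldl pvAStep (PySem.Dict.empty, [], [])
  let m := if st.2.2 ≠ [] then st.1.insert st.2.2 (PySem.Chars.join ['\n'] st.2.1) else st.1
  (String.ofList (PySem.Chars.strip (content_list.getLastD [])),
   m.items.map (fun kv => (String.ofList kv.1, String.ofList kv.2)))

-- ===== PORT B =====
-- loop body of B's grouping loop: a 'var' line opens a new block, other lines extend the last block.
def pvBStep (bs : List (List Char × List (List Char))) (line : List Char) :
    List (List Char × List (List Char)) :=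
  if PySem.Chars.startswith line "var".toList then
    bs ++ [((PySem.Chars.splitOn line [':']).headD [],
            [PySem.Chars.join [':'] (PySem.Chars.splitOn line [':']).tail])]
  else if bs = [] then bs
  else bs.dropLast ++ [((bs.getLastD ([], [])).1, (bs.getLastD ([], [])).2 ++ [line])]

def parse_abstract_for_code_alt (content : String) : String × (List (String × String)) :=
  let parts0 := PySem.Chars.splitOn content.toList "New Python code:".toList
  let parts := if parts0.length == 1 then PySem.Chars.splitOn content.toList "New Python Code:".toList else parts0
  let lines := (PySem.Chars.splitOn (PySem.Chars.strip (parts.headD [])) ['\n']).filter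
      (fun l => !PySem.Chars.startswith l "symbol".toList)
  let blocks := lines.foldl pvBStep []
  let m := blocks.foldl
      (fun (d : PySem.Dict (List Char) (List Char)) kv => d.insert kv.1 (PySem.Chars.join ['\n'] kv.2))
      PySem.Dict.empty
  (String.ofList (PySem.Chars.strip (parts.getLastD [])),
   m.items.map (fun kv => (String.ofList kv.1, String.ofList kv.2)))

-- ===== PRECONDITION & SPEC =====
-- On inputs whose symbols section (the text before the first marker line, the whole text if no
-- marker) has non-'symbol' lines before the first 'var' line and at least one 'var' line, A stores
-- those stray leading lines in the map under the leftover empty-string key '' (initial loop state),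
-- while B drops them; dropping junk before the first declared symbol is the intended behaviour, an
-- empty key is not a symbol.
def D_parse_abstract_for_code (content : String) : Prop :=
  let cs := content.toList
  let sym :=
    if PySem.Chars.isIn "New Python code:".toList cs then
      cs.take (PySem.Chars.find cs "New Python code:".toList).toNat
    else if PySem.Chars.isIn "New Python Code:".toList cs then
      cs.take (PySem.Chars.find cs "New Python Code:".toList).toNat
    else cs
  let ls := (PySem.Chars.splitOn (PySem.Chars.strip sym) ['\n']).filter
      (fun l => !PySem.Chars.startswith l "symbol".toList)
  ls ≠ [] ∧ ¬ ("var".toList <+: ls.headD []) ∧ ∃ l ∈ ls, "var".toList <+: l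
instance (content : String) : Decidable (D_parse_abstract_for_code content) := by
  unfold D_parse_abstract_for_code; infer_instance

def Spec_parse_abstract_for_code (content : String) (out : String × (List (String × String))) : Prop :=
  ¬ D_parse_abstract_for_code content → out = parse_abstract_for_code_alt content
instance (content : String) (out : String × (List (String × String))) :
    Decidable (Spec_parse_abstract_for_code content out) := by
  unfold Spec_parse_abstract_for_code; infer_instance

def pvDiffWitness_parse_abstract_for_code : String := "junk\nvar x:1"
def pvDiffWitnessOut_parse_abstract_for_code :
    (String × (List (String × String))) × (String × (List (String × String))) :=
  (("junk\nvar x:1", [("", "junk"), ("var x", "1")]),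
   ("junk\nvar x:1", [("var x", "1")]))

-- ===== CLAIM =====
def Claim_unchanged_parse_abstract_for_code : Prop :=
  ∀ (content : String), Dom_parse_abstract_for_code content →
    Spec_parse_abstract_for_code content (parse_abstract_for_code content)
def Claim_changed_parse_abstract_for_code : Prop :=
  Dom_parse_abstract_for_code (pvDiffWitness_parse_abstract_for_code) ∧
  D_parse_abstract_for_code (pvDiffWitness_parse_abstract_for_code) ∧
  parse_abstract_for_code (pvDiffWitness_parse_abstract_for_code) = pvDiffWitnessOut_parse_abstract_for_code.1 ∧
  parse_abstract_for_code_alt (pvDiffWitness_parse_abstract_for_code) = pvDiffWitnessOut_parse_abstract_for_code.2 ∧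
  pvDiffWitnessOut_parse_abstract_for_code.1 ≠ pvDiffWitnessOut_parse_abstract_for_code.2

def Claim_exact_parse_abstract_for_code : Prop :=
  ∀ (content : String), Dom_parse_abstract_for_code content → D_parse_abstract_for_code content →
    parse_abstract_for_code content ≠ parse_abstract_for_code_alt content

-- ===== LEMMAS AND PROOFS =====

-- splitOn.go with a nonempty accumulator just prepends its reverse
theorem pv_go_append (sep : List Char) (fuel : Nat) :
    ∀ (l cur : List Char) (acc : List (List Char)),
    PySem.Chars.splitOn.go sep fuel l cur acc = acc.reverse ++ PySem.Chars.splitOn.go sep fuel l cur [] := by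
  induction fuel with
  | zero => intro l cur acc; rw [PySem.Chars.splitOn.go.eq_def, PySem.Chars.splitOn.go.eq_def]; simp
  | succ n ih =>
    intro l cur acc
    rw [PySem.Chars.splitOn.go.eq_def, PySem.Chars.splitOn.go.eq_def]
    cases l with
    | nil => simp
    | cons c rest =>
      simp only
      by_cases hp : sep.isPrefixOf (c :: rest) = true
      · simp only [hp, if_true]
        rw [ih _ [] (cur.reverse :: acc), ih _ [] [cur.reverse]]
        simp
      · simp only [hp, Bool.false_eq_true, if_false]
        exact ih rest (c :: cur) acc

-- the first piece produced by splitOn.go extends cur.reverse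
theorem pv_go_head (fuel : Nat) :
    ∀ (l cur : List Char), ∃ r, (PySem.Chars.splitOn.go [':'] fuel l cur []).headD [] = cur.reverse ++ r := by
  induction fuel with
  | zero => intro l cur; rw [PySem.Chars.splitOn.go.eq_def]; exact ⟨l, by simp⟩
  | succ n ih =>
    intro l cur
    rw [PySem.Chars.splitOn.go.eq_def]
    cases l with
    | nil => exact ⟨[], by simp⟩
    | cons c rest =>
      simp only
      by_cases hp : List.isPrefixOf [':'] (c :: rest) = true
      · simp only [hp, if_true]
        rw [pv_go_append]
        exact ⟨[], by simp⟩
      · simp only [hp, Bool.false_eq_true, if_false]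
        obtain ⟨r, hr⟩ := ih rest (c :: cur)
        refine ⟨c :: r, ?_⟩
        rw [hr]; simp

-- the key extracted from a 'var' line is nonempty
theorem pv_key_ne_nil (l : List Char) (h : PySem.Chars.startswith l "var".toList = true) :
    (PySem.Chars.splitOn l [':']).headD [] ≠ [] := by
  have hpre : "var".toList <+: l := (PySem.Chars.startswith_iff l _).mp h
  obtain ⟨t, ht⟩ := hpre
  subst ht
  show (PySem.Chars.splitOn ('v' :: 'a' :: 'r' :: t) [':']).headD [] ≠ []
  unfold PySem.Chars.splitOn
  rw [PySem.Chars.splitOn.go.eq_def]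
  simp only [List.length_cons, List.isPrefixOf]
  have hvc : (':' == 'v') = false := by decide
  simp only [hvc, Bool.false_and, Bool.false_eq_true, if_false]
  obtain ⟨r, hr⟩ := pv_go_head (t.length + 1 + 1 + 1) ('a' :: 'r' :: t) ['v']
  rw [hr]
  simp

theorem pv_find_eq (s sub : List Char) (k : Nat) (hk : sub <+: s.drop k)
    (hmin : ∀ i < k, ¬ sub <+: s.drop i) : PySem.Chars.find s sub = (k : Int) := by
  have hinf : PySem.Chars.isIn sub s = true :=
    (PySem.Chars.exists_prefix_drop_iff_isIn sub s).mp ⟨k, hk⟩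
  have hnn : 0 ≤ PySem.Chars.find s sub :=
    (PySem.Chars.find_nonneg_iff s sub).mpr ((PySem.Chars.isIn_iff_infix sub s).mp hinf)
  obtain ⟨hpre, hm⟩ := PySem.Chars.find_spec hnn
  have : (PySem.Chars.find s sub).toNat = k := by
    rcases Nat.lt_trichotomy (PySem.Chars.find s sub).toNat k with h | h | h
    · exact absurd hpre (hmin _ h)
    · exact h
    · exact absurd hk (hm k h)
  omega

theorem pv_go_ne_nil (sep : List Char) (fuel : Nat) :
    ∀ (l cur : List Char) (acc : List (List Char)),
    PySem.Chars.splitOn.go sep fuel l cur acc ≠ [] := by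
  induction fuel with
  | zero => intro l cur acc; rw [PySem.Chars.splitOn.go.eq_def]; simp
  | succ n ih =>
    intro l cur acc
    rw [PySem.Chars.splitOn.go.eq_def]
    cases l with
    | nil => simp
    | cons c rest =>
      simp only
      by_cases hp : sep.isPrefixOf (c :: rest) = true
      · simp only [hp, if_true]; exact ih _ _ _
      · simp only [hp, Bool.false_eq_true, if_false]; exact ih _ _ _

theorem pv_go_first (sep : List Char) (hsep : sep ≠ []) (fuel : Nat) :
    ∀ (l cur : List Char), l.length < fuel →
    (PySem.Chars.splitOn.go sep fuel l cur []).headD [] =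
      cur.reverse ++ (if PySem.Chars.find l sep = -1 then l
        else l.take (PySem.Chars.find l sep).toNat) := by
  induction fuel with
  | zero =>
    intro l cur hfl
    omega
  | succ n ih =>
    intro l cur hfl
    rw [PySem.Chars.splitOn.go.eq_def]
    cases l with
    | nil =>
      have : PySem.Chars.find [] sep = -1 := by
        rw [PySem.Chars.find_eq_neg_one_iff]
        intro h
        exact hsep (List.eq_nil_of_infix_nil h)
      simp [this]
    | cons c rest =>
      simp only
      by_cases hp : sep.isPrefixOf (c :: rest) = true
      · have hfind : PySem.Chars.find (c :: rest) sep = (0 : Int) := by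
          refine pv_find_eq _ _ 0 ?_ (by omega)
          simpa using (List.isPrefixOf_iff_prefix.mp hp)
        simp only [hp, if_true, hfind]
        rw [pv_go_append]
        simp
      · simp only [hp, Bool.false_eq_true, if_false]
        rw [ih rest (c :: cur) (by simpa using Nat.lt_of_succ_lt_succ hfl)]
        have hp' : ¬ sep <+: (c :: rest) := fun h => hp (List.isPrefixOf_iff_prefix.mpr h)
        by_cases hr : PySem.Chars.find rest sep = -1
        · have hl : PySem.Chars.find (c :: rest) sep = -1 := by
            rw [PySem.Chars.find_eq_neg_one_iff]
            intro hinf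
            obtain ⟨j, hj⟩ := (PySem.Chars.exists_prefix_drop_iff_isIn _ _).mpr
              ((PySem.Chars.isIn_iff_infix _ _).mpr hinf)
            cases j with
            | zero => exact hp' (by simpa using hj)
            | succ j' =>
              rw [PySem.Chars.find_eq_neg_one_iff] at hr
              exact hr ((PySem.Chars.isIn_iff_infix _ _).mp
                ((PySem.Chars.exists_prefix_drop_iff_isIn _ _).mp ⟨j', by simpa using hj⟩))
          simp [hr, hl]
        · have hnn : 0 ≤ PySem.Chars.find rest sep := by
            rcases (PySem.Chars.neg_one_le_find rest sep).lt_or_eq with h | h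
            · omega
            · exact absurd h.symm hr
          obtain ⟨hpre, hm⟩ := PySem.Chars.find_spec hnn
          have hl : PySem.Chars.find (c :: rest) sep = ((PySem.Chars.find rest sep).toNat + 1 : Nat) := by
            refine pv_find_eq _ _ _ ?_ ?_
            · simpa using hpre
            · intro i hi
              cases i with
              | zero => simpa using hp'
              | succ i' =>
                intro hc
                exact hm i' (by omega) (by simpa using hc)
          rw [hl]
          have h1 : ¬ ((((PySem.Chars.find rest sep).toNat + 1 : Nat) : Int) = -1) := by omega
          rw [if_neg h1, if_neg hr]
          simp only [List.append_assoc, List.reverse_cons, List.cons_append,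
            List.append_cancel_left_eq]
          have h2 : ((((PySem.Chars.find rest sep).toNat + 1 : Nat) : Int)).toNat
              = (PySem.Chars.find rest sep).toNat + 1 := by omega
          rw [h2, List.take_succ_cons, List.nil_append]

theorem pv_splitOn_head (cs sep : List Char) (hsep : sep ≠ []) :
    (PySem.Chars.splitOn cs sep).headD [] =
      (if PySem.Chars.isIn sep cs then cs.take (PySem.Chars.find cs sep).toNat else cs) := by
  unfold PySem.Chars.splitOn
  rw [pv_go_first sep hsep _ cs [] (by omega)]
  by_cases hin : PySem.Chars.isIn sep cs = true
  · have : ¬ PySem.Chars.find cs sep = -1 := by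
      rw [PySem.Chars.find_eq_neg_one_iff]
      simpa using (PySem.Chars.isIn_iff_infix sep cs).mp hin
    rw [if_neg this, if_pos hin]
    simp
  · have : PySem.Chars.find cs sep = -1 := by
      rw [PySem.Chars.find_eq_neg_one_iff]
      intro h
      exact hin ((PySem.Chars.isIn_iff_infix sep cs).mpr h)
    rw [if_pos this, if_neg hin]
    simp

theorem pv_go_len1 (sep : List Char) (hsep : sep ≠ []) (fuel : Nat) :
    ∀ (l cur : List Char), l.length < fuel →
    ((PySem.Chars.splitOn.go sep fuel l cur []).length = 1 ↔ ¬ sep <:+: l) := by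
  induction fuel with
  | zero => intro l cur hfl; omega
  | succ n ih =>
    intro l cur hfl
    rw [PySem.Chars.splitOn.go.eq_def]
    cases l with
    | nil =>
      simp only [List.reverse_cons, List.reverse_nil, List.nil_append, List.length_singleton]
      constructor
      · intro _ h
        exact hsep (List.eq_nil_of_infix_nil h)
      · intro _; trivial
    | cons c rest =>
      simp only
      by_cases hp : sep.isPrefixOf (c :: rest) = true
      · simp only [hp, if_true]
        rw [pv_go_append]
        constructor
        · intro hlen
          exfalso
          have hpos : 0 < (PySem.Chars.splitOn.go sep n (List.drop sep.length (c :: rest)) [] []).length :=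
            List.length_pos_of_ne_nil (pv_go_ne_nil sep n _ [] [])
          simp only [List.reverse_cons, List.reverse_nil, List.nil_append, List.length_append,
            List.length_cons, List.length_nil] at hlen
          omega
        · intro h
          exact absurd ((List.isPrefixOf_iff_prefix.mp hp).isInfix) h
      · simp only [hp, Bool.false_eq_true, if_false]
        rw [ih rest (c :: cur) (by simpa using Nat.lt_of_succ_lt_succ hfl)]
        have hp' : ¬ sep <+: (c :: rest) := fun h => hp (List.isPrefixOf_iff_prefix.mpr h)
        constructor
        · intro hnr hinf
          obtain ⟨j, hj⟩ := (PySem.Chars.exists_prefix_drop_iff_isIn sep (c :: rest)).mpr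
            ((PySem.Chars.isIn_iff_infix sep (c :: rest)).mpr hinf)
          cases j with
          | zero => exact hp' (by simpa using hj)
          | succ j' =>
            exact hnr ((PySem.Chars.isIn_iff_infix sep rest).mp
              ((PySem.Chars.exists_prefix_drop_iff_isIn sep rest).mp ⟨j', by simpa using hj⟩))
        · intro hnl hinf
          exact hnl (hinf.trans (List.suffix_cons c rest).isInfix)

theorem pv_splitOn_len1 (cs sep : List Char) (hsep : sep ≠ []) :
    ((PySem.Chars.splitOn cs sep).length = 1 ↔ PySem.Chars.isIn sep cs = false) := by
  unfold PySem.Chars.splitOn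
  rw [pv_go_len1 sep hsep _ cs [] (by omega)]
  rw [← PySem.Chars.isIn_iff_infix]
  simp

-- A's trailing "if key: symbols_map[key] = ..." step
def pvFinA (st : PySem.Dict (List Char) (List Char) × List (List Char) × List Char) :
    PySem.Dict (List Char) (List Char) :=
  if st.2.2 ≠ [] then st.1.insert st.2.2 (PySem.Chars.join ['\n'] st.2.1) else st.1

theorem pvAStep_symbol (st : PySem.Dict (List Char) (List Char) × List (List Char) × List Char)
    (l : List Char) (h : PySem.Chars.startswith l ['s','y','m','b','o','l'] = true) :
    pvAStep st l = st := by
  unfold pvAStep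
  rw [show "symbol".toList = ['s','y','m','b','o','l'] from rfl, if_pos h]

theorem pvAStep_other (st : PySem.Dict (List Char) (List Char) × List (List Char) × List Char)
    (l : List Char) (hs : PySem.Chars.startswith l ['s','y','m','b','o','l'] = false)
    (hv : PySem.Chars.startswith l ['v','a','r'] = false) :
    pvAStep st l = (st.1, st.2.1 ++ [l], st.2.2) := by
  unfold pvAStep
  rw [show "symbol".toList = ['s','y','m','b','o','l'] from rfl,
      show "var".toList = ['v','a','r'] from rfl,
      if_neg (by simp [hs]), if_neg (by simp [hv])]

theorem pvAStep_var (st : PySem.Dict (List Char) (List Char) × List (List Char) × List Char)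
    (l : List Char) (hs : PySem.Chars.startswith l ['s','y','m','b','o','l'] = false)
    (hv : PySem.Chars.startswith l ['v','a','r'] = true) :
    pvAStep st l =
      ((if st.2.1 ≠ [] then st.1.insert st.2.2 (PySem.Chars.join ['\n'] st.2.1) else st.1).insert
          ((PySem.Chars.splitOn l [':']).headD [])
          (PySem.Chars.join ['\n'] [PySem.Chars.join [':'] (PySem.Chars.splitOn l [':']).tail]),
        [PySem.Chars.join [':'] (PySem.Chars.splitOn l [':']).tail],
        (PySem.Chars.splitOn l [':']).headD []) := by
  unfold pvAStep
  rw [show "symbol".toList = ['s','y','m','b','o','l'] from rfl,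
      show "var".toList = ['v','a','r'] from rfl,
      if_neg (by simp [hs]), if_pos hv]

theorem pvBStep_var (bs : List (List Char × List (List Char))) (l : List Char)
    (hv : PySem.Chars.startswith l ['v','a','r'] = true) :
    pvBStep bs l = bs ++ [((PySem.Chars.splitOn l [':']).headD [],
        [PySem.Chars.join [':'] (PySem.Chars.splitOn l [':']).tail])] := by
  unfold pvBStep
  rw [show "var".toList = ['v','a','r'] from rfl, if_pos hv]

theorem pvBStep_other (bs : List (List Char × List (List Char))) (l : List Char)
    (hv : PySem.Chars.startswith l ['v','a','r'] = false) :
    pvBStep bs l = if bs = [] then bs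
      else bs.dropLast ++ [((bs.getLastD ([], [])).1, (bs.getLastD ([], [])).2 ++ [l])] := by
  unfold pvBStep
  rw [show "var".toList = ['v','a','r'] from rfl, if_neg (by simp [hv])]

-- A's loop ignores 'symbol' lines, so folding over the filtered list is the same
theorem pv_foldl_filter (ls : List (List Char)) :
    ∀ st, (ls.filter (fun l => !PySem.Chars.startswith l "symbol".toList)).foldl pvAStep st
      = ls.foldl pvAStep st := by
  induction ls with
  | nil => intro st; rfl
  | cons l ls ih =>
    intro st
    by_cases h : PySem.Chars.startswith l ['s','y','m','b','o','l'] = true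
    · rw [show List.filter (fun l => !PySem.Chars.startswith l "symbol".toList) (l :: ls)
          = List.filter (fun l => !PySem.Chars.startswith l "symbol".toList) ls by
        simp [h]]
      rw [ih, List.foldl_cons, pvAStep_symbol st l h]
    · rw [show List.filter (fun l => !PySem.Chars.startswith l "symbol".toList) (l :: ls)
          = l :: List.filter (fun l => !PySem.Chars.startswith l "symbol".toList) ls by
        simp [h]]
      rw [List.foldl_cons, List.foldl_cons, ih]

theorem pvBStep_ne_nil (bs : List (List Char × List (List Char))) (l : List Char)
    (h : bs ≠ []) : pvBStep bs l ≠ [] := by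
  by_cases hv : PySem.Chars.startswith l ['v','a','r'] = true
  · rw [pvBStep_var bs l hv]; simp
  · rw [pvBStep_other bs l (by simpa using hv), if_neg h]; simp

theorem pvBStep_append (cl bs : List (List Char × List (List Char))) (l : List Char)
    (h : bs ≠ []) : pvBStep (cl ++ bs) l = cl ++ pvBStep bs l := by
  by_cases hv : PySem.Chars.startswith l ['v','a','r'] = true
  · rw [pvBStep_var _ l hv, pvBStep_var bs l hv, List.append_assoc]
  · have hv' : PySem.Chars.startswith l ['v','a','r'] = false := by simpa using hv
    rw [pvBStep_other _ l hv', pvBStep_other bs l hv', if_neg h, if_neg (by simp [h])]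
    rw [List.dropLast_append_of_ne_nil h,
        List.getLastD_eq_getLast?, List.getLast?_append_of_ne_nil cl h,
        ← List.getLastD_eq_getLast?, List.append_assoc]

-- B's grouping loop never touches blocks to the left of a nonempty tail
theorem pv_Bpre (ls : List (List Char)) :
    ∀ cl bs, bs ≠ [] → ls.foldl pvBStep (cl ++ bs) = cl ++ ls.foldl pvBStep bs := by
  induction ls with
  | nil => intro cl bs _; rfl
  | cons l ls ih =>
    intro cl bs h
    simp only [List.foldl_cons]
    rw [pvBStep_append cl bs l h, ih cl _ (pvBStep_ne_nil bs l h)]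

-- without 'var' lines A only grows pre_value_list
theorem pv_Anovar (ls : List (List Char)) :
    ∀ m pre key, (∀ l ∈ ls, PySem.Chars.startswith l ['v','a','r'] = false) →
    ∃ pre', ls.foldl pvAStep (m, pre, key) = (m, pre', key) := by
  induction ls with
  | nil => intro m pre key _; exact ⟨pre, rfl⟩
  | cons l ls ih =>
    intro m pre key h
    have hl := h l (by simp)
    have hrest : ∀ l' ∈ ls, PySem.Chars.startswith l' ['v','a','r'] = false :=
      fun l' hm => h l' (by simp [hm])
    by_cases hs : PySem.Chars.startswith l ['s','y','m','b','o','l'] = true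
    · rw [List.foldl_cons, pvAStep_symbol _ l hs]
      exact ih m pre key hrest
    · rw [List.foldl_cons, pvAStep_other _ l (by simpa using hs) hl]
      exact ih m (pre ++ [l]) key hrest

-- without 'var' lines B never opens a block
theorem pv_Bnovar (ls : List (List Char))
    (h : ∀ l ∈ ls, PySem.Chars.startswith l ['v','a','r'] = false) :
    ls.foldl pvBStep [] = [] := by
  induction ls with
  | nil => rfl
  | cons l ls ih =>
    have hl := h l (by simp)
    rw [List.foldl_cons, pvBStep_other [] l hl, if_pos rfl]
    exact ih (fun l' hm => h l' (by simp [hm]))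

-- simulation invariant: A's (dict, pending lines, key) state vs B's open last block
theorem pvMain (ls : List (List Char)) :
    ∀ (d : PySem.Dict (List Char) (List Char)) (k : List Char) (vs : List (List Char)) (v : List Char),
    k ≠ [] → vs ≠ [] → (∀ l ∈ ls, PySem.Chars.startswith l ['s','y','m','b','o','l'] = false) →
    pvFinA (ls.foldl pvAStep (d.insert k v, vs, k))
      = (ls.foldl pvBStep [(k, vs)]).foldl
          (fun d kv => d.insert kv.1 (PySem.Chars.join ['\n'] kv.2)) d := by
  induction ls with
  | nil =>
    intro d k vs v hk _ _
    simp only [List.foldl_nil, pvFinA, List.foldl_cons]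
    rw [if_pos hk, PySem.Dict.insert_insert_self]
  | cons l ls ih =>
    intro d k vs v hk hvs hsym
    have hsl : PySem.Chars.startswith l ['s','y','m','b','o','l'] = false := hsym l (by simp)
    have hsrest : ∀ l' ∈ ls, PySem.Chars.startswith l' ['s','y','m','b','o','l'] = false :=
      fun l' hm => hsym l' (by simp [hm])
    by_cases hv : PySem.Chars.startswith l ['v','a','r'] = true
    · -- a new var line: close the open block, open a new one
      rw [List.foldl_cons, List.foldl_cons, pvAStep_var _ l hsl hv, pvBStep_var _ l hv]
      simp only [if_pos hvs]
      rw [PySem.Dict.insert_insert_self,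
          ih (d.insert k (PySem.Chars.join ['\n'] vs)) _ _ _ (pv_key_ne_nil l (by simpa using hv))
            (by simp) hsrest,
          pv_Bpre ls [(k, vs)] _ (by simp), List.foldl_append]
      rfl
    · -- an ordinary line: extend the open block
      rw [List.foldl_cons, List.foldl_cons, pvAStep_other _ l hsl (by simpa using hv),
          show pvBStep [(k, vs)] l = [(k, vs ++ [l])] by
            rw [pvBStep_other _ l (by simpa using hv), if_neg (by simp)]; simp]
      exact ih d k (vs ++ [l]) v hk (by simp) hsrest

-- the dictionaries agree on any symbols section outside the change region
theorem pv_core (L : List (List Char))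
    (hnD : ¬ ((L.filter (fun l => !PySem.Chars.startswith l "symbol".toList)) ≠ [] ∧
      PySem.Chars.startswith
        ((L.filter (fun l => !PySem.Chars.startswith l "symbol".toList)).headD []) ['v','a','r'] = false ∧
      (L.filter (fun l => !PySem.Chars.startswith l "symbol".toList)).any
        (fun l => PySem.Chars.startswith l ['v','a','r']) = true)) :
    pvFinA (L.foldl pvAStep (PySem.Dict.empty, [], []))
      = ((L.filter (fun l => !PySem.Chars.startswith l "symbol".toList)).foldl pvBStep []).foldl
          (fun d kv => d.insert kv.1 (PySem.Chars.join ['\n'] kv.2)) PySem.Dict.empty := by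
  rw [← pv_foldl_filter]
  have hsymF : ∀ l ∈ L.filter (fun l => !PySem.Chars.startswith l "symbol".toList),
      PySem.Chars.startswith l ['s','y','m','b','o','l'] = false := by
    intro l hl
    have := List.of_mem_filter hl
    simpa using this
  revert hnD hsymF
  cases hF : L.filter (fun l => !PySem.Chars.startswith l "symbol".toList) with
  | nil => intro _ _; rfl
  | cons f0 rest =>
    intro hnD hsymF
    by_cases hv : PySem.Chars.startswith f0 ['v','a','r'] = true
    · have h1 : pvAStep (PySem.Dict.empty, [], []) f0 =
          (PySem.Dict.empty.insert ((PySem.Chars.splitOn f0 [':']).headD [])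
              (PySem.Chars.join ['\n'] [PySem.Chars.join [':'] (PySem.Chars.splitOn f0 [':']).tail]),
            [PySem.Chars.join [':'] (PySem.Chars.splitOn f0 [':']).tail],
            (PySem.Chars.splitOn f0 [':']).headD []) := by
        rw [pvAStep_var _ f0 (hsymF f0 (by simp)) hv]
        simp
      have h2 : pvBStep [] f0 = [(((PySem.Chars.splitOn f0 [':']).headD []),
          [PySem.Chars.join [':'] (PySem.Chars.splitOn f0 [':']).tail])] := by
        rw [pvBStep_var _ f0 hv]
        simp
      rw [List.foldl_cons, List.foldl_cons, h1, h2,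
          pvMain rest _ _ _ _ (pv_key_ne_nil f0 (by simpa using hv)) (by simp)
            (fun l' hm => hsymF l' (by simp [hm]))]
    · have hv' : PySem.Chars.startswith f0 ['v','a','r'] = false := by simpa using hv
      have hany : ((f0 :: rest).any (fun l => PySem.Chars.startswith l ['v','a','r']) = true) → False :=
        fun h => hnD ⟨by simp, by simpa using hv', h⟩
      have hall : ∀ l ∈ f0 :: rest, PySem.Chars.startswith l ['v','a','r'] = false := by
        intro l hl
        by_contra hc
        exact hany (by simp only [List.any_eq_true]; exact ⟨l, hl, by simpa using hc⟩)
      obtain ⟨pre', hA⟩ := pv_Anovar (f0 :: rest) PySem.Dict.empty [] [] hall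
      rw [hA, pv_Bnovar _ hall]
      rfl

-- D_'s marker-and-take description of the symbols section coincides with the ports' splitOn prologue
theorem pv_D_shape (content : String) :
    D_parse_abstract_for_code content ↔
      (((PySem.Chars.splitOn (PySem.Chars.strip
          ((if (PySem.Chars.splitOn content.toList "New Python code:".toList).length == 1
            then PySem.Chars.splitOn content.toList "New Python Code:".toList
            else PySem.Chars.splitOn content.toList "New Python code:".toList).headD [])) ['\n']).filter
          (fun l => !PySem.Chars.startswith l "symbol".toList)) ≠ [] ∧
       PySem.Chars.startswith
         (((PySem.Chars.splitOn (PySem.Chars.strip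
          ((if (PySem.Chars.splitOn content.toList "New Python code:".toList).length == 1
            then PySem.Chars.splitOn content.toList "New Python Code:".toList
            else PySem.Chars.splitOn content.toList "New Python code:".toList).headD [])) ['\n']).filter
          (fun l => !PySem.Chars.startswith l "symbol".toList)).headD []) ['v','a','r'] = false ∧
       ((PySem.Chars.splitOn (PySem.Chars.strip
          ((if (PySem.Chars.splitOn content.toList "New Python code:".toList).length == 1
            then PySem.Chars.splitOn content.toList "New Python Code:".toList
            else PySem.Chars.splitOn content.toList "New Python code:".toList).headD [])) ['\n']).filter
          (fun l => !PySem.Chars.startswith l "symbol".toList)).any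
          (fun l => PySem.Chars.startswith l ['v','a','r']) = true) := by
  have hfp : (if (PySem.Chars.splitOn content.toList "New Python code:".toList).length == 1
        then PySem.Chars.splitOn content.toList "New Python Code:".toList
        else PySem.Chars.splitOn content.toList "New Python code:".toList).headD []
      = (if PySem.Chars.isIn "New Python code:".toList content.toList then
          content.toList.take (PySem.Chars.find content.toList "New Python code:".toList).toNat
        else if PySem.Chars.isIn "New Python Code:".toList content.toList then
          content.toList.take (PySem.Chars.find content.toList "New Python Code:".toList).toNat
        else content.toList) := by
    by_cases hin1 : PySem.Chars.isIn "New Python code:".toList content.toList = true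
    · have hne : ¬ (((PySem.Chars.splitOn content.toList "New Python code:".toList).length == 1) = true) := by
        simp only [beq_iff_eq]
        rw [pv_splitOn_len1 _ _ (by decide)]
        simp only [Bool.not_eq_false]
        exact hin1
      rw [if_neg hne, pv_splitOn_head _ _ (by decide), if_pos hin1, if_pos hin1]
    · have heq : (((PySem.Chars.splitOn content.toList "New Python code:".toList).length == 1) = true) := by
        simp only [beq_iff_eq]
        rw [pv_splitOn_len1 _ _ (by decide)]
        exact Bool.not_eq_true _ ▸ (by simpa using hin1)
      rw [if_pos heq, pv_splitOn_head _ _ (by decide), if_neg hin1]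
  unfold D_parse_abstract_for_code
  rw [hfp]
  simp only [List.any_eq_true, Bool.eq_false_iff, Ne, PySem.Chars.startswith_iff]
  exact Iff.rfl

theorem pv_final (content : String) (hnD : ¬ D_parse_abstract_for_code content) :
    parse_abstract_for_code content = parse_abstract_for_code_alt content := by
  have hcore := pv_core
    (PySem.Chars.splitOn (PySem.Chars.strip
      ((if (PySem.Chars.splitOn content.toList "New Python code:".toList).length == 1
        then PySem.Chars.splitOn content.toList "New Python Code:".toList
        else PySem.Chars.splitOn content.toList "New Python code:".toList).headD [])) ['\n'])
    (fun h => hnD ((pv_D_shape content).mpr h))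
  exact congrArg (fun m : PySem.Dict (List Char) (List Char) =>
    (String.ofList (PySem.Chars.strip
      ((if (PySem.Chars.splitOn content.toList "New Python code:".toList).length == 1
        then PySem.Chars.splitOn content.toList "New Python Code:".toList
        else PySem.Chars.splitOn content.toList "New Python code:".toList).getLastD [])),
     m.items.map (fun kv => (String.ofList kv.1, String.ofList kv.2)))) hcore


-- proof-only abbreviations of the ports' shared prologue and output shape
def pvL (content : String) : List (List Char) :=
  PySem.Chars.splitOn (PySem.Chars.strip
    ((if (PySem.Chars.splitOn content.toList "New Python code:".toList).length == 1
      then PySem.Chars.splitOn content.toList "New Python Code:".toList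
      else PySem.Chars.splitOn content.toList "New Python code:".toList).headD [])) ['\n']

def pvF (content : String) : List (List Char) :=
  (pvL content).filter (fun l => !PySem.Chars.startswith l "symbol".toList)

def pvOut (content : String) (m : PySem.Dict (List Char) (List Char)) :
    String × (List (String × String)) :=
  (String.ofList (PySem.Chars.strip
    ((if (PySem.Chars.splitOn content.toList "New Python code:".toList).length == 1
      then PySem.Chars.splitOn content.toList "New Python Code:".toList
      else PySem.Chars.splitOn content.toList "New Python code:".toList).getLastD [])),
   m.items.map (fun kv => (String.ofList kv.1, String.ofList kv.2)))

-- the dict of A's loop never loses a key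
theorem pvA_keep (ls : List (List Char)) :
    ∀ st, st.1.contains ([] : List Char) = true →
    (pvFinA (ls.foldl pvAStep st)).contains ([] : List Char) = true := by
  induction ls with
  | nil =>
    intro st h
    unfold pvFinA
    split_ifs with hk
    · rw [PySem.Dict.contains_insert]; simp [h]
    · exact h
  | cons l ls ih =>
    intro st h
    rw [List.foldl_cons]
    refine ih _ ?_
    unfold pvAStep
    split_ifs with h1 h2 h3
    · exact h
    · simp only
      rw [PySem.Dict.contains_insert, PySem.Dict.contains_insert]
      simp [h]
    · simp only
      rw [PySem.Dict.contains_insert]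
      simp [h]
    · exact h

-- once A is buffering stray lines under the empty key, the first var line files them under ''
theorem pvA_gets_nil (ls : List (List Char)) :
    ∀ m pre, pre ≠ [] → (∃ l ∈ ls, PySem.Chars.startswith l ['v','a','r'] = true) →
    (∀ l ∈ ls, PySem.Chars.startswith l ['s','y','m','b','o','l'] = false) →
    (pvFinA (ls.foldl pvAStep (m, pre, ([] : List Char)))).contains ([] : List Char) = true := by
  induction ls with
  | nil => intro m pre _ hex _; exact absurd hex (by simp)
  | cons l ls ih =>
    intro m pre hpre hex hsym
    have hsl : PySem.Chars.startswith l ['s','y','m','b','o','l'] = false := hsym l (by simp)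
    have hsrest : ∀ l' ∈ ls, PySem.Chars.startswith l' ['s','y','m','b','o','l'] = false :=
      fun l' hm => hsym l' (by simp [hm])
    by_cases hv : PySem.Chars.startswith l ['v','a','r'] = true
    · rw [List.foldl_cons, pvAStep_var _ l hsl hv]
      refine pvA_keep ls _ ?_
      simp only [if_pos hpre]
      rw [PySem.Dict.contains_insert, PySem.Dict.contains_insert]
      simp
    · rw [List.foldl_cons, pvAStep_other _ l hsl (by simpa using hv)]
      refine ih m (pre ++ [l]) (by simp) ?_ hsrest
      obtain ⟨x, hx, hvx⟩ := hex
      rcases List.mem_cons.mp hx with rfl | hx'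
      · exact absurd hvx (by simpa using hv)
      · exact ⟨x, hx', hvx⟩

-- every block key B ever creates comes from a 'var' line, hence is nonempty
theorem pvB_keys (ls : List (List Char)) :
    ∀ bs, (∀ kv ∈ bs, kv.1 ≠ ([] : List Char)) →
    ∀ kv ∈ ls.foldl pvBStep bs, kv.1 ≠ ([] : List Char) := by
  induction ls with
  | nil => intro bs h; exact h
  | cons l ls ih =>
    intro bs h
    rw [List.foldl_cons]
    refine ih _ ?_
    intro kv hkv
    by_cases hv : PySem.Chars.startswith l ['v','a','r'] = true
    · rw [pvBStep_var _ l hv] at hkv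
      rcases List.mem_append.mp hkv with hin | hnew
      · exact h kv hin
      · have : kv = ((PySem.Chars.splitOn l [':']).headD [],
            [PySem.Chars.join [':'] (PySem.Chars.splitOn l [':']).tail]) := by simpa using hnew
        rw [this]
        exact pv_key_ne_nil l (by simpa using hv)
    · rw [pvBStep_other _ l (by simpa using hv)] at hkv
      by_cases hbs : bs = []
      · rw [if_pos hbs] at hkv
        exact h kv hkv
      · rw [if_neg hbs] at hkv
        rcases List.mem_append.mp hkv with hin | hlast
        · exact h kv (List.Sublist.subset (List.dropLast_sublist bs) hin)
        · have hmem : bs.getLastD ([], []) ∈ bs := by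
            rw [List.getLastD_eq_getLast?, List.getLast?_eq_some_getLast hbs]
            simp only [Option.getD_some]
            exact List.getLast_mem hbs
          have : kv.1 = (bs.getLastD ([], [])).1 := by
            have := List.mem_singleton.mp hlast
            rw [this]
          rw [this]
          exact h _ hmem

-- folding B's nonempty-keyed blocks into a dict never creates the empty key
theorem pvIns_nil_free (bs : List (List Char × List (List Char))) :
    ∀ (d : PySem.Dict (List Char) (List Char)), (∀ kv ∈ bs, kv.1 ≠ ([] : List Char)) →
    d.contains ([] : List Char) = false →
    (bs.foldl (fun d kv => d.insert kv.1 (PySem.Chars.join ['\n'] kv.2)) d).contains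
      ([] : List Char) = false := by
  induction bs with
  | nil => intro d _ h; exact h
  | cons kv bs ih =>
    intro d hks h
    rw [List.foldl_cons]
    refine ih _ (fun kv' hm => hks kv' (by simp [hm])) ?_
    have hk : kv.1 ≠ ([] : List Char) := hks kv (by simp)
    have hbk : (([] : List Char) == kv.1) = false :=
      beq_eq_false_iff_ne.mpr (fun hc => hk hc.symm)
    rw [PySem.Dict.contains_insert, hbk, h]
    rfl

set_option maxHeartbeats 1000000 in
theorem parse_abstract_for_code_tight_aux (content : String)
    (hD : D_parse_abstract_for_code content) :
    parse_abstract_for_code content ≠ parse_abstract_for_code_alt content := by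
  obtain ⟨hne, hhead, hany⟩ :
      pvF content ≠ [] ∧
      PySem.Chars.startswith ((pvF content).headD []) ['v','a','r'] = false ∧
      (pvF content).any (fun l => PySem.Chars.startswith l ['v','a','r']) = true :=
    (pv_D_shape content).mp hD
  have hsymF : ∀ l ∈ pvF content, PySem.Chars.startswith l ['s','y','m','b','o','l'] = false := by
    intro l hl
    have := List.of_mem_filter hl
    simpa using this
  have hA : parse_abstract_for_code content
      = pvOut content (pvFinA ((pvF content).foldl pvAStep (PySem.Dict.empty, [], []))) := by
    show pvOut content (pvFinA ((pvL content).foldl pvAStep (PySem.Dict.empty, [], []))) = _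
    rw [← pv_foldl_filter (pvL content)]
    rfl
  have hB : parse_abstract_for_code_alt content
      = pvOut content (((pvF content).foldl pvBStep []).foldl
          (fun d kv => d.insert kv.1 (PySem.Chars.join ['\n'] kv.2)) PySem.Dict.empty) := rfl
  intro heq
  rw [hA, hB] at heq
  have hsnd := congrArg (fun p : String × (List (String × String)) => p.2) heq
  simp only [pvOut] at hsnd
  -- A's dict contains the empty key
  have hcontA : (pvFinA ((pvF content).foldl pvAStep (PySem.Dict.empty, [], []))).contains
      ([] : List Char) = true := by
    rcases hF : pvF content with _ | ⟨f0, rest⟩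
    · exact absurd hF hne
    · rw [hF] at hhead hany hsymF
      have hv0 : PySem.Chars.startswith f0 ['v','a','r'] = false := by simpa using hhead
      rw [List.foldl_cons, pvAStep_other _ f0 (hsymF f0 (by simp)) hv0]
      refine pvA_gets_nil rest _ _ (by simp) ?_ (fun l' hm => hsymF l' (by simp [hm]))
      obtain ⟨x, hx, hvx⟩ := List.any_eq_true.mp hany
      rcases List.mem_cons.mp hx with rfl | hx'
      · exact absurd hvx (by simp [hv0])
      · exact ⟨x, hx', hvx⟩
  -- B's dict does not
  have hcontB : (((pvF content).foldl pvBStep []).foldl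
      (fun d kv => d.insert kv.1 (PySem.Chars.join ['\n'] kv.2))
      (PySem.Dict.empty : PySem.Dict (List Char) (List Char))).contains ([] : List Char) = false :=
    pvIns_nil_free _ _ (pvB_keys (pvF content) [] (by simp)) (PySem.Dict.contains_empty _)
  have hkeysB : ∀ kv ∈ (((pvF content).foldl pvBStep []).foldl
      (fun d kv => d.insert kv.1 (PySem.Chars.join ['\n'] kv.2))
      (PySem.Dict.empty : PySem.Dict (List Char) (List Char))).items, kv.1 ≠ ([] : List Char) := by
    intro kv hkv hnil
    have hmemk : ([] : List Char) ∈ (((pvF content).foldl pvBStep []).foldl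
        (fun d kv => d.insert kv.1 (PySem.Chars.join ['\n'] kv.2))
        (PySem.Dict.empty : PySem.Dict (List Char) (List Char))).keys := by
      have h1 : kv.1 ∈ (((pvF content).foldl pvBStep []).foldl
          (fun d kv => d.insert kv.1 (PySem.Chars.join ['\n'] kv.2))
          (PySem.Dict.empty : PySem.Dict (List Char) (List Char))).items.map (fun p => p.1) :=
        List.mem_map.mpr ⟨kv, hkv, rfl⟩
      rw [hnil] at h1
      simpa only [PySem.Dict.keys] using h1
    rw [← PySem.Dict.contains_iff_mem_keys] at hmemk
    rw [hmemk] at hcontB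
    cases hcontB
  -- derive the contradiction through the mapped key lists
  obtain ⟨v, hv⟩ : ∃ v, (([] : List Char), v) ∈
      (pvFinA ((pvF content).foldl pvAStep (PySem.Dict.empty, [], []))).items := by
    have hmem := (PySem.Dict.contains_iff_mem_keys _ _).mp hcontA
    simp only [PySem.Dict.keys] at hmem
    obtain ⟨kv, hkv, hk1⟩ := List.mem_map.mp hmem
    refine ⟨kv.2, ?_⟩
    have hkveq : (([] : List Char), kv.2) = kv := by rw [← hk1]
    rw [hkveq]
    exact hkv
  have hin : (("" : String), String.ofList v) ∈
      (pvFinA ((pvF content).foldl pvAStep (PySem.Dict.empty, [], []))).items.map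
        (fun kv => (String.ofList kv.1, String.ofList kv.2)) := by
    refine List.mem_map.mpr ⟨_, hv, rfl⟩
  rw [hsnd] at hin
  obtain ⟨kv, hkv, hkeq⟩ := List.mem_map.mp hin
  have : String.ofList kv.1 = "" := congrArg Prod.fst hkeq
  exact hkeysB kv hkv (by
    have := congrArg String.toList this
    simpa using this)

-- ===== VERDICT =====
theorem parse_abstract_for_code_spec : Claim_unchanged_parse_abstract_for_code := by
  intro content _hdom hnD
  exact pv_final content hnD
theorem parse_abstract_for_code_changed : Claim_changed_parse_abstract_for_code := by
  unfold Claim_changed_parse_abstract_for_code; decide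
theorem parse_abstract_for_code_tight : Claim_exact_parse_abstract_for_code := by
  intro content _hdom hD
  exact parse_abstract_for_code_tight_aux content hD
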